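-- pv_equiv track=rewrite | github.com/pubg-tonylin/machine-learining | 5.AdaBoost.py | getGm
-- ===== SOURCE A (Python) =====
-- def getGm(x,y):
--     g_m=[[],[],[],[],[],[],[],[]]
--     v=[0,1,0,1,2,0,1,2]
--     for j in range(len(x[0])):
--         if(x[0][j]<=v[0]):
--             g_m[0].append(-1)
--         else:
--             g_m[0].append(1)
--     for j in range(len(x[0])):
--         if(x[0][j]<=v[1]):
--             g_m[1].append(-1)
--         else:
--             g_m[1].append(1)
--     for j in range(len(x[1])):
--         if(x[1][j]<=v[2]):
--             g_m[2].append(1)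
--         else:
--             g_m[2].append(-1)
--     for j in range(len(x[1])):
--         if(x[1][j]<=v[3]):
--             g_m[3].append(1)
--         else:
--             g_m[3].append(-1)
--     for j in range(len(x[1])):
--         if(x[1][j]<=v[4]):
--             g_m[4].append(1)
--         else:
--             g_m[4].append(-1)
--     for j in range(len(x[2])):
--         if(x[2][j]<=v[5]):
--             g_m[5].append(1)
--         else:
--             g_m[5].append(-1)
--     for j in range(len(x[2])):
--         if(x[2][j]<=v[6]):
--             g_m[6].append(1)
--         else:
--             g_m[6].append(-1)
--     for j in range(len(x[2])):
--         if(x[2][j]<=v[7]):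
--             g_m[7].append(1)
--         else:
--             g_m[7].append(-1)
--     return g_m
-- ===== SOURCE B (Python) =====
-- def getGm(x, y):
--     # classifiers on x[0]: thresholds 0,1 with labels (-1 below, 1 above);
--     # one pass: bucket each element once, append the precomputed label pair
--     a, b = [], []
--     for e in x[0]:
--         p = (-1, -1) if e <= 0 else (1, -1) if e <= 1 else (1, 1)
--         a.append(p[0])
--         b.append(p[1])
--
--     # classifiers on x[1] and x[2]: thresholds 0,1,2 with labels (1 below, -1 above)
--     def triple(row):
--         c, d, f = [], [], []
--         for e in row:
--             t = (1, 1, 1) if e <= 0 else (-1, 1, 1) if e <= 1 else (-1, -1, 1) if e <= 2 else (-1, -1, -1)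
--             c.append(t[0])
--             d.append(t[1])
--             f.append(t[2])
--         return c, d, f
--
--     c, d, f = triple(x[1])
--     g, h, i = triple(x[2])
--     return [a, b, c, d, f, g, h, i]
-- ===== Notes on version B (the rewrite author's own statement) =====
-- stated objective: alternative
-- what changed: Instead of eight independent threshold passes, B makes one pass per input row (three passes total): each element is bucketed once by a comparison chain and the precomputed label tuple for all of that row's classifiers is appended to parallel accumulators.
import Mathlib
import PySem

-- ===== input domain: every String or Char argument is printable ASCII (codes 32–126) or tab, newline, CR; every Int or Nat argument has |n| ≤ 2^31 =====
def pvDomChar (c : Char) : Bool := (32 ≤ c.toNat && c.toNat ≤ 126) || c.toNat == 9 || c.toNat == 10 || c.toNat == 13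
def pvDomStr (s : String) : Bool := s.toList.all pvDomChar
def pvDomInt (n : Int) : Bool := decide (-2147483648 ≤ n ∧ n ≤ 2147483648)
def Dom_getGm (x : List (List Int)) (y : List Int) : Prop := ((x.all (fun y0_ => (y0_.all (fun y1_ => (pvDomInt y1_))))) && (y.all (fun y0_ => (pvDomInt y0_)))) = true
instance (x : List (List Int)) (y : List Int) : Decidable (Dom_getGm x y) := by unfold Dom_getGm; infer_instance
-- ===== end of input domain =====

-- B replaces A's eight independent threshold passes by one bucketing pass per input row
-- (3 passes, parallel accumulators); return value only — neither program mutates its arguments.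

-- ===== PORT A =====
def getGm (x : List (List Int)) (y : List Int) : List (List Int) :=
  let v : List Int := [0, 1, 0, 1, 2, 0, 1, 2]
  let g0 := (PySem.List.pyRange 0 ((PySem.List.pyGetD x 0 []).length : Int) 1).foldl
    (fun acc j => if PySem.List.pyGetD (PySem.List.pyGetD x 0 []) j 0 ≤ PySem.List.pyGetD v 0 0 then acc ++ [(-1 : Int)] else acc ++ [1]) []
  let g1 := (PySem.List.pyRange 0 ((PySem.List.pyGetD x 0 []).length : Int) 1).foldl
    (fun acc j => if PySem.List.pyGetD (PySem.List.pyGetD x 0 []) j 0 ≤ PySem.List.pyGetD v 1 0 then acc ++ [(-1 : Int)] else acc ++ [1]) []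
  let g2 := (PySem.List.pyRange 0 ((PySem.List.pyGetD x 1 []).length : Int) 1).foldl
    (fun acc j => if PySem.List.pyGetD (PySem.List.pyGetD x 1 []) j 0 ≤ PySem.List.pyGetD v 2 0 then acc ++ [(1 : Int)] else acc ++ [-1]) []
  let g3 := (PySem.List.pyRange 0 ((PySem.List.pyGetD x 1 []).length : Int) 1).foldl
    (fun acc j => if PySem.List.pyGetD (PySem.List.pyGetD x 1 []) j 0 ≤ PySem.List.pyGetD v 3 0 then acc ++ [(1 : Int)] else acc ++ [-1]) []
  let g4 := (PySem.List.pyRange 0 ((PySem.List.pyGetD x 1 []).length : Int) 1).foldl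
    (fun acc j => if PySem.List.pyGetD (PySem.List.pyGetD x 1 []) j 0 ≤ PySem.List.pyGetD v 4 0 then acc ++ [(1 : Int)] else acc ++ [-1]) []
  let g5 := (PySem.List.pyRange 0 ((PySem.List.pyGetD x 2 []).length : Int) 1).foldl
    (fun acc j => if PySem.List.pyGetD (PySem.List.pyGetD x 2 []) j 0 ≤ PySem.List.pyGetD v 5 0 then acc ++ [(1 : Int)] else acc ++ [-1]) []
  let g6 := (PySem.List.pyRange 0 ((PySem.List.pyGetD x 2 []).length : Int) 1).foldl
    (fun acc j => if PySem.List.pyGetD (PySem.List.pyGetD x 2 []) j 0 ≤ PySem.List.pyGetD v 6 0 then acc ++ [(1 : Int)] else acc ++ [-1]) []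
  let g7 := (PySem.List.pyRange 0 ((PySem.List.pyGetD x 2 []).length : Int) 1).foldl
    (fun acc j => if PySem.List.pyGetD (PySem.List.pyGetD x 2 []) j 0 ≤ PySem.List.pyGetD v 7 0 then acc ++ [(1 : Int)] else acc ++ [-1]) []
  [g0, g1, g2, g3, g4, g5, g6, g7]

-- ===== PORT B =====
-- one pass over x[0]: bucket each element, append the label pair to parallel accumulators
def pvPairPass : List Int → List Int × List Int → List Int × List Int
  | [], st => st
  | e :: t, (a, b) =>
    let p : Int × Int := if e ≤ 0 then (-1, -1) else if e ≤ 1 then (1, -1) else (1, 1)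
    pvPairPass t (a ++ [p.1], b ++ [p.2])

-- one pass over x[1] / x[2]: bucket each element, append the label triple
def pvTriplePass : List Int → List Int × List Int × List Int → List Int × List Int × List Int
  | [], st => st
  | e :: t, (c, d, f) =>
    let q : Int × Int × Int :=
      if e ≤ 0 then (1, 1, 1) else if e ≤ 1 then (-1, 1, 1)
      else if e ≤ 2 then (-1, -1, 1) else (-1, -1, -1)
    pvTriplePass t (c ++ [q.1], d ++ [q.2.1], f ++ [q.2.2])

def getGm_alt (x : List (List Int)) (y : List Int) : List (List Int) :=
  let ab := pvPairPass (PySem.List.pyGetD x 0 []) ([], [])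
  let cdf := pvTriplePass (PySem.List.pyGetD x 1 []) ([], [], [])
  let ghi := pvTriplePass (PySem.List.pyGetD x 2 []) ([], [], [])
  [ab.1, ab.2, cdf.1, cdf.2.1, cdf.2.2, ghi.1, ghi.2.1, ghi.2.2]

-- ===== PRECONDITION & SPEC =====
-- A indexes x[0], x[1], x[2]; it raises IndexError when x has fewer than 3 rows (B raises there too).
def Pre_getGm (x : List (List Int)) (y : List Int) : Prop := 3 ≤ x.length
instance (x : List (List Int)) (y : List Int) : Decidable (Pre_getGm x y) := by unfold Pre_getGm; infer_instance
def pvWitness_getGm : List (List Int) × List Int := ([[0, 1, 3], [2, -1], [1]], [1, -1])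

def Spec_getGm (x : List (List Int)) (y : List Int) (out : List (List Int)) : Prop := out = getGm_alt x y
instance (x : List (List Int)) (y : List Int) (out : List (List Int)) : Decidable (Spec_getGm x y out) := by unfold Spec_getGm; infer_instance

-- ===== CLAIM (what is proved, stated in full; the proofs are below) =====
def Claim_equal_getGm : Prop := ∀ (x : List (List Int)) (y : List Int), Dom_getGm x y → Pre_getGm x y → Spec_getGm x y (getGm x y)

-- ===== LEMMAS AND PROOFS =====

-- one append-loop of A over a row equals a map over that row
theorem pvRow_eq (r : List Int) (v lo hi : Int) :
    (PySem.List.pyRange 0 (r.length : Int) 1).foldl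
      (fun acc j => if PySem.List.pyGetD r j 0 ≤ v then acc ++ [lo] else acc ++ [hi]) []
    = r.map (fun e => if e ≤ v then lo else hi) := by
  rw [PySem.List.foldl_pyRange_zero_pyGetD' r 0
    (fun acc e => if e ≤ v then acc ++ [lo] else acc ++ [hi]) []]
  suffices h : ∀ (acc : List Int),
      r.foldl (fun acc e => if e ≤ v then acc ++ [lo] else acc ++ [hi]) acc
        = acc ++ r.map (fun e => if e ≤ v then lo else hi) by
    simpa using h []
  induction r with
  | nil => intro acc; simp
  | cons a t ih =>
    intro acc
    by_cases hav : a ≤ v <;> simp [List.foldl_cons, hav, ih, List.append_assoc]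

theorem pvPairPass_eq (r : List Int) (a b : List Int) :
    pvPairPass r (a, b)
      = (a ++ r.map (fun e => if e ≤ 0 then (-1 : Int) else 1),
         b ++ r.map (fun e => if e ≤ 1 then (-1 : Int) else 1)) := by
  induction r generalizing a b with
  | nil => simp [pvPairPass]
  | cons e t ih =>
    by_cases h0 : e ≤ 0
    · have h1 : e ≤ 1 := by omega
      simp [pvPairPass, h0, h1, ih, List.append_assoc]
    · by_cases h1 : e ≤ 1 <;> simp [pvPairPass, h0, h1, ih, List.append_assoc]

theorem pvTriplePass_eq (r : List Int) (c d f : List Int) :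
    pvTriplePass r (c, d, f)
      = (c ++ r.map (fun e => if e ≤ 0 then (1 : Int) else -1),
         d ++ r.map (fun e => if e ≤ 1 then (1 : Int) else -1),
         f ++ r.map (fun e => if e ≤ 2 then (1 : Int) else -1)) := by
  induction r generalizing c d f with
  | nil => simp [pvTriplePass]
  | cons e t ih =>
    by_cases h0 : e ≤ 0
    · have h1 : e ≤ 1 := by omega
      have h2 : e ≤ 2 := by omega
      simp [pvTriplePass, h0, h1, h2, ih, List.append_assoc]
    · by_cases h1 : e ≤ 1
      · have h2 : e ≤ 2 := by omega
        simp [pvTriplePass, h0, h1, h2, ih, List.append_assoc]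
      · by_cases h2 : e ≤ 2 <;> simp [pvTriplePass, h0, h1, h2, ih, List.append_assoc]

-- ===== VERDICT (by name: the statement is the Claim_ definition above) =====
theorem getGm_spec : Claim_equal_getGm := by
  intro x y _ _
  unfold Spec_getGm getGm getGm_alt
  simp only [pvRow_eq, pvPairPass_eq, pvTriplePass_eq, List.nil_append]
  rfl
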